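-- pv_equiv track=rewrite | github.com/hydrangeazel/sbox44-kripto | components/ui_sbox_modifier.py | matrix_determinant_mod2
-- ===== SOURCE A (Python) =====
-- def matrix_determinant_mod2(matrix):
--     """
--     Menghitung determinan matriks 8x8 dalam GF(2) (mod 2).
--     Menggunakan eliminasi Gauss.
--     """
--     mat = [row[:] for row in matrix]
--     n = len(mat)
--     det = 1
--
--     for i in range(n):
--         # Cari baris dengan 1 di kolom i
--         pivot = -1
--         for j in range(i, n):
--             if mat[j][i] == 1:
--                 pivot = j
--                 break
--
--         if pivot == -1:
--             return 0  # Determinant = 0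
--
--         # Swap rows
--         if pivot != i:
--             mat[i], mat[pivot] = mat[pivot], mat[i]
--             det = (det + 1) % 2  # Toggle sign (tapi di GF(2), -1 = 1)
--
--         # Eliminasi
--         for j in range(i + 1, n):
--             if mat[j][i] == 1:
--                 for k in range(i, n):
--                     mat[j][k] = (mat[j][k] + mat[i][k]) % 2
--
--     return det
-- ===== SOURCE B (Python) =====
-- def matrix_determinant_mod2(matrix):
--     """Determinant of a 0/1 matrix over GF(2) by pure recursive Gaussian
--     elimination: move a pivot row to the front, clear the column below it
--     with row additions mod 2, then recurse on the matrix with its first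
--     row and first column removed.  Never mutates the input."""
--     def go(rows, det):
--         if not rows:
--             return det
--         k = next((j for j, r in enumerate(rows) if r[0] == 1), None)
--         if k is None:
--             return 0
--         if k:
--             rows = rows[:]
--             rows[0], rows[k] = rows[k], rows[0]
--             det ^= 1
--         pivot = rows[0]
--         rest = [
--             [(x + y) % 2 for x, y in zip(r, pivot)][1:] if r[0] == 1 else r[1:]
--             for r in rows[1:]
--         ]
--         return go(rest, det)
--     return go(list(matrix), 1)
-- ===== Notes on version B (the rewrite author's own statement) =====
-- stated objective: simpler
-- what changed: Replaces A's in-place, index-driven triple loop with a pure structural recursion: swap the pivot row to the front, eliminate with a single zip comprehension, and recurse on the matrix with its first row and column trimmed; Pre_ excludes matrices with an empty row and ragged matrices whose elimination actually starts (some row begins with 1), on which A raises IndexError part-way through for most inputs and any value it does return depends on how far the ragged sweep happens to get.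
-- outside the precondition, e.g. on matrix_determinant_mod2([[0, 0], [1]]): A returns 0, B returns 0
import Mathlib
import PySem

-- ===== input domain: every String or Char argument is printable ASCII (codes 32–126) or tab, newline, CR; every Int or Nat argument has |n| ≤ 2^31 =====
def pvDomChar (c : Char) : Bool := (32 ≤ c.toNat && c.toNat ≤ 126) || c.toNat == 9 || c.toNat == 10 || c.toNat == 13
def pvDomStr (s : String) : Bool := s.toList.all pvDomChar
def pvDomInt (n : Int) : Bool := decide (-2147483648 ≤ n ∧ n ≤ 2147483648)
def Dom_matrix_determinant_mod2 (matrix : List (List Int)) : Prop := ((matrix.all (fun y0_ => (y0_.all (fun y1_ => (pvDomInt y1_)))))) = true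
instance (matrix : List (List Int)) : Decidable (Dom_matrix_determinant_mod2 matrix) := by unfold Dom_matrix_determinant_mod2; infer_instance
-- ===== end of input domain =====

-- B replaces A's in-place indexed triple loop by a pure structural recursion
-- (pivot to front, one zip comprehension per eliminated row, recurse on the
-- matrix with its first row and column trimmed); objective: simpler.

-- ===== PORT A =====
-- mat[j][k] (indices are provably in range under Pre_; getD 0 is the total reading)
def pvGet2 (mat : List (List Int)) (j k : Nat) : Int := (mat.getD j []).getD k 0

-- 'for j in range(i, n): if mat[j][i] == 1: pivot = j; break' — range(i,n) over
-- nonnegative bounds ports exactly to List.range' i (n-i); break-with-result is find?.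
def pvFindPivot (mat : List (List Int)) (i n : Nat) : Option Nat :=
  (List.range' i (n - i)).find? (fun j => pvGet2 mat j i == 1)

-- 'mat[i], mat[pivot] = mat[pivot], mat[i]'
def pvSwapA (mat : List (List Int)) (i p : Nat) : List (List Int) :=
  (mat.set i (mat.getD p [])).set p (mat.getD i [])

-- inner 'for k in range(i, n): mat[j][k] = (mat[j][k] + mat[i][k]) % 2'
def pvElimRow (rowi rowj : List Int) (i n : Nat) : List Int :=
  (List.range' i (n - i)).foldl
    (fun rj k => rj.set k (PySem.Int.mod (rj.getD k 0 + rowi.getD k 0) 2)) rowj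

-- 'for j in range(i+1, n): if mat[j][i] == 1: <inner loop>'
def pvElimA (mat : List (List Int)) (i n : Nat) : List (List Int) :=
  (List.range' (i + 1) (n - (i + 1))).foldl
    (fun m j => if pvGet2 m j i == 1 then m.set j (pvElimRow (m.getD i []) (m.getD j []) i n) else m) mat

-- 'for i in range(n): …' with the early 'return 0'
def pvLoopA (n i : Nat) (mat : List (List Int)) (det : Int) : Int :=
  if _h : i < n then
    match pvFindPivot mat i n with
    | none => 0
    | some p =>
      let mat' := if p ≠ i then pvSwapA mat i p else mat
      let det' := if p ≠ i then PySem.Int.mod (det + 1) 2 else det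
      pvLoopA n (i + 1) (pvElimA mat' i n) det'
  else det
termination_by n - i

def matrix_determinant_mod2 (matrix : List (List Int)) : Int :=
  pvLoopA matrix.length 0 matrix 1

-- ===== PORT B =====
-- Source B: 'rows[0], rows[k] = rows[k], rows[0]'
def pvSwapB (rows : List (List Int)) (k : Nat) : List (List Int) :=
  (rows.set 0 (rows.getD k [])).set k (rows.getD 0 [])

-- Source B: '[(x + y) % 2 for x, y in zip(r, pivot)]'
def pvAddRow (r pivot : List Int) : List Int :=
  (r.zip pivot).map (fun p => PySem.Int.mod (p.1 + p.2) 2)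

-- Source B: the 'rest = [... for r in rows[1:]]' comprehension
def pvStepB (rows : List (List Int)) : List (List Int) :=
  (rows.drop 1).map (fun r =>
    if r.getD 0 0 == 1 then (pvAddRow r (rows.getD 0 [])).drop 1 else r.drop 1)

-- Source B's recursive 'go'; 'next((j for j, r in enumerate(rows) if r[0] == 1), None)' is findIdx?
def pvGoB (rows : List (List Int)) (det : Int) : Int :=
  match rows with
  | [] => det
  | r0 :: rtl =>
    match (r0 :: rtl).findIdx? (fun r => r.getD 0 0 == 1) with
    | none => 0
    | some k =>
      -- 'det ^= 1' is Int.xor (no HXor instance on Int in Lean)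
      pvGoB (pvStepB (if k ≠ 0 then pvSwapB (r0 :: rtl) k else r0 :: rtl))
            (if k ≠ 0 then Int.xor det 1 else det)
termination_by rows.length
decreasing_by
  simp only [pvStepB, List.length_map, List.length_drop]
  split <;> simp [pvSwapB]

def matrix_determinant_mod2_alt (matrix : List (List Int)) : Int :=
  pvGoB matrix 1

-- ===== PRECONDITION & SPEC =====
-- Pre_ excludes matrices with an empty row and, when some row starts with a 1
-- (so the elimination actually proceeds past the first pivot search), ragged
-- matrices with a row shorter than the row count: there A raises IndexError
-- part-way through the elimination on most inputs, and any value it does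
-- return depends on how far the ragged sweep happens to get.
def Pre_matrix_determinant_mod2 (matrix : List (List Int)) : Prop :=
  (∀ row ∈ matrix, row ≠ []) ∧
  ((∃ row ∈ matrix, row.getD 0 0 = 1) → ∀ row ∈ matrix, matrix.length ≤ row.length)
instance (matrix : List (List Int)) : Decidable (Pre_matrix_determinant_mod2 matrix) := by
  unfold Pre_matrix_determinant_mod2; infer_instance

def pvWitness_matrix_determinant_mod2 : List (List Int) := [[1, 0], [1, 1]]

def Spec_matrix_determinant_mod2 (matrix : List (List Int)) (out : Int) : Prop :=
  out = matrix_determinant_mod2_alt matrix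
instance (matrix : List (List Int)) (out : Int) : Decidable (Spec_matrix_determinant_mod2 matrix out) := by
  unfold Spec_matrix_determinant_mod2; infer_instance

-- ===== CLAIM (what is proved, stated in full; the proofs are below) =====
def Claim_equal_matrix_determinant_mod2 : Prop :=
  ∀ (matrix : List (List Int)), Dom_matrix_determinant_mod2 matrix →
    Pre_matrix_determinant_mod2 matrix →
    Spec_matrix_determinant_mod2 matrix (matrix_determinant_mod2 matrix)

-- ===== LEMMAS AND PROOFS =====

theorem pv_getD_set {α : Type} (l : List α) (i j : Nat) (a d : α) :
    (l.set i a).getD j d = if i = j ∧ j < l.length then a else l.getD j d := by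
  rcases Nat.lt_or_ge j l.length with h | h
  · by_cases hij : i = j
    · subst hij
      simp [List.getD_eq_getElem?_getD, h]
    · simp [List.getD_eq_getElem?_getD, List.getElem?_set_ne hij, hij]
  · have hne : ¬ (i = j ∧ j < l.length) := by omega
    rw [if_neg hne, List.getD_eq_getElem?_getD, List.getD_eq_getElem?_getD,
      List.getElem?_eq_none (by simpa using h), List.getElem?_eq_none h]

-- the correspondence invariant: B's rows are A's rows i…n-1, trimmed of their
-- first i columns, up to the (never-read) columns ≥ n
def pvRel (n i : Nat) (mat : List (List Int)) (rows : List (List Int)) : Prop :=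
  mat.length = n ∧ rows.length = n - i ∧
  (∀ j, j < n → n ≤ (mat.getD j []).length) ∧
  (∀ j, j < n - i → n - i ≤ (rows.getD j []).length) ∧
  (∀ j c, j < n - i → c < n - i → (rows.getD j []).getD c 0 = pvGet2 mat (i + j) (i + c))

theorem pv_find_shift (d : List Int) :
    ∀ (rows : List (List Int)) (s : Nat) (p : Nat → Bool) (q : List Int → Bool),
      (∀ t, t < rows.length → q (rows.getD t d) = p (s + t)) →
      (List.range' s rows.length).find? p = (rows.findIdx? q).map (fun k => s + k) := by
  intro rows
  induction rows with
  | nil => intro s p q _; simp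
  | cons a tl ih =>
    intro s p q hq
    have ha : q a = p s := by simpa using hq 0 (by simp)
    rw [List.length_cons, List.range'_succ, List.find?_cons, List.findIdx?_cons, ha]
    cases hps : p s with
    | true => simp
    | false =>
      have htl : ∀ t, t < tl.length → q (tl.getD t d) = p (s + 1 + t) := by
        intro t ht
        have := hq (t + 1) (by simpa using Nat.succ_lt_succ ht)
        simpa [Nat.add_comm, Nat.add_left_comm, Nat.add_assoc] using this
      rw [ih (s + 1) p q htl]
      cases tl.findIdx? q <;> simp [Nat.add_comm, Nat.add_left_comm]

theorem pv_elimA_char (i n : Nat) : ∀ (m s : Nat) (mat : List (List Int)), i < s →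
    (((List.range' s m).foldl (fun m' j => if pvGet2 m' j i == 1 then m'.set j (pvElimRow (m'.getD i []) (m'.getD j []) i n) else m') mat).length = mat.length
    ∧ ∀ j, ((List.range' s m).foldl (fun m' j => if pvGet2 m' j i == 1 then m'.set j (pvElimRow (m'.getD i []) (m'.getD j []) i n) else m') mat).getD j []
        = if s ≤ j ∧ j < s + m ∧ j < mat.length ∧ pvGet2 mat j i = 1
          then pvElimRow (mat.getD i []) (mat.getD j []) i n else mat.getD j []) := by
  intro m
  induction m with
  | zero =>
    intro s mat _
    refine ⟨by simp, fun j => ?_⟩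
    rw [if_neg (by omega)]
    simp
  | succ m ih =>
    intro s mat his
    rw [List.range'_succ, List.foldl_cons]
    set mat1 := (if pvGet2 mat s i == 1
      then mat.set s (pvElimRow (mat.getD i []) (mat.getD s []) i n) else mat) with hm1
    have hlen1 : mat1.length = mat.length := by
      rw [hm1]; split <;> simp
    have hgi : mat1.getD i [] = mat.getD i [] := by
      rw [hm1]; split
      · rw [pv_getD_set, if_neg (by omega)]
      · rfl
    have hgother : ∀ j, j ≠ s → mat1.getD j [] = mat.getD j [] := by
      intro j hj
      rw [hm1]; split
      · rw [pv_getD_set, if_neg (by omega)]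
      · rfl
    obtain ⟨hL, hG⟩ := ih (s + 1) mat1 (by omega)
    refine ⟨hL.trans hlen1, fun j => ?_⟩
    rw [hG j]
    by_cases hjs : j = s
    · subst hjs
      rw [if_neg (by omega)]
      rw [hm1]
      by_cases hc : pvGet2 mat j i = 1
      · rw [if_pos (by simpa using hc), pv_getD_set]
        by_cases hlt : j < mat.length
        · rw [if_pos ⟨rfl, hlt⟩, if_pos ⟨le_refl j, by omega, hlt, hc⟩]
        · rw [if_neg (by omega), if_neg (by omega)]
      · rw [if_neg (by simpa using hc), if_neg (by omega)]
    · have h1 := hgother j hjs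
      have hcc : pvGet2 mat1 j i = pvGet2 mat j i := by
        unfold pvGet2; rw [h1]
      rw [h1, hgi, hcc, hlen1]
      by_cases hin2 : s + 1 ≤ j ∧ j < s + 1 + m ∧ j < mat.length ∧ pvGet2 mat j i = 1
      · rw [if_pos hin2, if_pos ⟨by omega, by omega, hin2.2.2⟩]
      · rw [if_neg hin2]
        have hneg : ¬ (s ≤ j ∧ j < s + (m + 1) ∧ j < mat.length ∧ pvGet2 mat j i = 1) := by
          rintro ⟨ha', hb', hc', hd'⟩
          exact hin2 ⟨by omega, by omega, hc', hd'⟩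
        rw [if_neg hneg]

theorem pv_elimFold (rowi : List Int) :
    ∀ (m s : Nat) (rowj : List Int), s + m ≤ rowj.length →
      ((List.range' s m).foldl
          (fun rj k => rj.set k (PySem.Int.mod (rj.getD k 0 + rowi.getD k 0) 2)) rowj).length
        = rowj.length ∧
      (∀ k, ((List.range' s m).foldl
          (fun rj k => rj.set k (PySem.Int.mod (rj.getD k 0 + rowi.getD k 0) 2)) rowj).getD k 0
        = if s ≤ k ∧ k < s + m then PySem.Int.mod (rowj.getD k 0 + rowi.getD k 0) 2
          else rowj.getD k 0) := by
  intro m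
  induction m with
  | zero =>
    intro s rowj _
    refine ⟨by simp, fun k => ?_⟩
    rw [if_neg (by omega)]
    simp
  | succ m ih =>
    intro s rowj h
    rw [List.range'_succ, List.foldl_cons]
    have hs : s < rowj.length := by omega
    set v := PySem.Int.mod (rowj.getD s 0 + rowi.getD s 0) 2 with hv
    have hlen' : (rowj.set s v).length = rowj.length := by simp
    obtain ⟨hl, hg⟩ := ih (s + 1) (rowj.set s v) (by omega)
    refine ⟨hl.trans hlen', fun k => ?_⟩
    rw [hg k]
    by_cases hks : k = s
    · subst hks
      rw [if_neg (by omega), if_pos (by omega), pv_getD_set, if_pos ⟨rfl, hs⟩]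
    · have hset : (rowj.set s v).getD k 0 = rowj.getD k 0 := by
        rw [pv_getD_set, if_neg (by omega)]
      by_cases hkr : s + 1 ≤ k ∧ k < s + 1 + m
      · rw [if_pos hkr, if_pos (by omega), hset]
      · rw [if_neg hkr, if_neg (by omega), hset]

theorem pv_elimRow_spec (rowi rowj : List Int) (i n : Nat) (hin : i ≤ n)
    (h : n ≤ rowj.length) :
    (pvElimRow rowi rowj i n).length = rowj.length ∧
    (∀ k, (pvElimRow rowi rowj i n).getD k 0
      = if i ≤ k ∧ k < n then PySem.Int.mod (rowj.getD k 0 + rowi.getD k 0) 2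
        else rowj.getD k 0) := by
  obtain ⟨h1, h2⟩ := pv_elimFold rowi (n - i) i rowj (by omega)
  refine ⟨h1, fun k => ?_⟩
  unfold pvElimRow
  rw [h2 k]
  by_cases hk : i ≤ k ∧ k < n
  · rw [if_pos (by omega), if_pos hk]
  · rw [if_neg (by omega), if_neg hk]

theorem pv_swap_rel (n i k : Nat) (hin : i < n) (hk : k < n - i) (mat rows : List (List Int))
    (h : pvRel n i mat rows) : pvRel n i (pvSwapA mat i (i + k)) (pvSwapB rows k) := by
  obtain ⟨hml, hrl, hrowA, hrowB, hent⟩ := h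
  have hikn : i + k < n := by omega
  have hgA : ∀ j, (pvSwapA mat i (i + k)).getD j []
      = if i + k = j then mat.getD i [] else if i = j then mat.getD (i + k) []
        else mat.getD j [] := by
    intro j
    unfold pvSwapA
    rw [pv_getD_set, pv_getD_set]
    simp only [List.length_set]
    by_cases hpj : i + k = j
    · rw [if_pos ⟨hpj, by omega⟩, if_pos hpj]
    · rw [if_neg (fun hcon => hpj hcon.1), if_neg hpj]
      by_cases hij : i = j
      · rw [if_pos ⟨hij, by omega⟩, if_pos hij]
      · rw [if_neg (fun hcon => hij hcon.1), if_neg hij]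
  have hgB : ∀ j, (pvSwapB rows k).getD j []
      = if k = j then rows.getD 0 [] else if 0 = j then rows.getD k []
        else rows.getD j [] := by
    intro j
    unfold pvSwapB
    rw [pv_getD_set, pv_getD_set]
    simp only [List.length_set]
    by_cases hpj : k = j
    · rw [if_pos ⟨hpj, by omega⟩, if_pos hpj]
    · rw [if_neg (fun hcon => hpj hcon.1), if_neg hpj]
      by_cases hij : (0 : Nat) = j
      · rw [if_pos ⟨hij, by omega⟩, if_pos hij]
      · rw [if_neg (fun hcon => hij hcon.1), if_neg hij]
  refine ⟨by simp [pvSwapA, hml], by simp [pvSwapB, hrl], ?_, ?_, ?_⟩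
  · intro j hj
    rw [hgA j]
    by_cases hpj : i + k = j
    · rw [if_pos hpj]; exact hrowA i hin
    · rw [if_neg hpj]
      by_cases hij : i = j
      · rw [if_pos hij]; exact hrowA (i + k) hikn
      · rw [if_neg hij]; exact hrowA j hj
  · intro j hj
    rw [hgB j]
    by_cases hpj : k = j
    · rw [if_pos hpj]; exact hrowB 0 (by omega)
    · rw [if_neg hpj]
      by_cases hij : (0 : Nat) = j
      · rw [if_pos hij]; exact hrowB k hk
      · rw [if_neg hij]; exact hrowB j hj
  · intro j c hj hc
    simp only [pvGet2]
    rw [hgB j, hgA (i + j)]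
    by_cases hpj : k = j
    · rw [if_pos hpj, if_pos (show i + k = i + j by omega)]
      have := hent 0 c (by omega) hc
      simpa [pvGet2] using this
    · rw [if_neg hpj, if_neg (show ¬ i + k = i + j by omega)]
      by_cases hij : (0 : Nat) = j
      · rw [if_pos hij, if_pos (show i = i + j by omega)]
        subst hij
        simpa [pvGet2] using hent k c hk hc
      · rw [if_neg hij, if_neg (show ¬ i = i + j by omega)]
        simpa [pvGet2] using hent j c hj hc

theorem pv_drop_getD (l : List Int) (c : Nat) (d : Int) :
    (l.drop 1).getD c d = l.getD (1 + c) d := by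
  simp [List.getD_eq_getElem?_getD, Nat.add_comm]

theorem pv_mapdrop_getD (f : List Int → List Int) (l : List (List Int)) (j : Nat)
    (hj : j + 1 < l.length) : ((l.drop 1).map f).getD j [] = f (l.getD (j + 1) []) := by
  rw [List.getD_eq_getElem?_getD, List.getElem?_map, List.getElem?_drop,
    List.getElem?_eq_getElem (by omega), List.getD_eq_getElem _ _ (by omega)]
  simp [Nat.add_comm]

theorem pv_addRow_length (r p : List Int) : (pvAddRow r p).length = min r.length p.length := by
  simp [pvAddRow]

theorem pv_addRow_getD (r p : List Int) (c : Nat) (hc : c < r.length) (hc2 : c < p.length) :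
    (pvAddRow r p).getD c 0 = PySem.Int.mod (r.getD c 0 + p.getD c 0) 2 := by
  have hz : c < (r.zip p).length := by simp [List.length_zip]; omega
  rw [pvAddRow, List.getD_eq_getElem _ _ (by simpa using hz), List.getElem_map,
    List.getElem_zip, List.getD_eq_getElem _ _ hc, List.getD_eq_getElem _ _ hc2]

theorem pv_step_rel (n i : Nat) (hin : i < n) (mat rows : List (List Int))
    (h : pvRel n i mat rows) : pvRel n (i + 1) (pvElimA mat i n) (pvStepB rows) := by
  obtain ⟨hml, hrl, hrowA, hrowB, hent⟩ := h
  obtain ⟨hclen, hcget⟩ := pv_elimA_char i n (n - (i + 1)) (i + 1) mat (by omega)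
  have hchar1 : (pvElimA mat i n).length = mat.length := hclen
  have hchar2 : ∀ j, (pvElimA mat i n).getD j []
      = if i + 1 ≤ j ∧ j < (i + 1) + (n - (i + 1)) ∧ j < mat.length ∧ pvGet2 mat j i = 1
        then pvElimRow (mat.getD i []) (mat.getD j []) i n else mat.getD j [] := hcget
  have hpivlen : n - i ≤ (rows.getD 0 []).length := hrowB 0 (by omega)
  have hstep : ∀ j, j < n - (i + 1) → (pvStepB rows).getD j []
      = (if (rows.getD (j + 1) []).getD 0 0 == 1
         then (pvAddRow (rows.getD (j + 1) []) (rows.getD 0 [])).drop 1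
         else (rows.getD (j + 1) []).drop 1) := by
    intro j hj
    unfold pvStepB
    exact pv_mapdrop_getD _ rows j (by omega)
  refine ⟨by rw [hchar1, hml], by simp [pvStepB]; omega, ?_, ?_, ?_⟩
  · intro j hj
    rw [hchar2 j]
    split
    · next hcond =>
      obtain ⟨hlen', _⟩ := pv_elimRow_spec (mat.getD i []) (mat.getD j []) i n (by omega)
        (hrowA j hj)
      rw [hlen']
      exact hrowA j hj
    · exact hrowA j hj
  · intro j hj
    rw [hstep j hj]
    have hrj : n - i ≤ (rows.getD (j + 1) []).length := hrowB (j + 1) (by omega)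
    split
    · rw [List.length_drop, pv_addRow_length]
      omega
    · rw [List.length_drop]
      omega
  · intro j c hj hc
    rw [hstep j hj]
    have hrj : n - i ≤ (rows.getD (j + 1) []).length := hrowB (j + 1) (by omega)
    have hcond : (rows.getD (j + 1) []).getD 0 0 = pvGet2 mat (i + 1 + j) i := by
      have := hent (j + 1) 0 (by omega) (by omega)
      rw [this]
      have h1 : i + (j + 1) = i + 1 + j := by omega
      have h2 : i + 0 = i := by omega
      rw [h1, h2]
    have hArow : i + 1 + j < n := by omega
    have hEj : ∀ c', c' < n - i →
        (rows.getD (j + 1) []).getD c' 0 = (mat.getD (i + 1 + j) []).getD (i + c') 0 := by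
      intro c' hc'
      have := hent (j + 1) c' (by omega) hc'
      rw [this]
      have h1 : i + (j + 1) = i + 1 + j := by omega
      rw [show pvGet2 mat (i + (j + 1)) (i + c') = (mat.getD (i + (j + 1)) []).getD (i + c') 0 from rfl, h1]
    have hP : ∀ c', c' < n - i →
        (rows.getD 0 []).getD c' 0 = (mat.getD i []).getD (i + c') 0 := by
      intro c' hc'
      have := hent 0 c' (by omega) hc'
      rw [this]
      have h2 : i + 0 = i := by omega
      rw [show pvGet2 mat (i + 0) (i + c') = (mat.getD (i + 0) []).getD (i + c') 0 from rfl, h2]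
    show _ = pvGet2 (pvElimA mat i n) (i + 1 + j) (i + 1 + c)
    by_cases hcc : pvGet2 mat (i + 1 + j) i = 1
    · have hA' : pvGet2 (pvElimA mat i n) (i + 1 + j) (i + 1 + c)
          = (pvElimRow (mat.getD i []) (mat.getD (i + 1 + j) []) i n).getD (i + 1 + c) 0 := by
        show ((pvElimA mat i n).getD (i + 1 + j) []).getD (i + 1 + c) 0 = _
        rw [hchar2 (i + 1 + j), if_pos ⟨by omega, by omega, by omega, hcc⟩]
      rw [if_pos (by rw [hcond]; exact beq_iff_eq.2 hcc), hA']
      rw [pv_drop_getD, pv_addRow_getD _ _ (1 + c) (by omega) (by omega)]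
      obtain ⟨_, hg⟩ := pv_elimRow_spec (mat.getD i []) (mat.getD (i + 1 + j) []) i n
        (by omega) (hrowA (i + 1 + j) hArow)
      rw [hg (i + 1 + c), if_pos ⟨by omega, by omega⟩]
      rw [hEj (1 + c) (by omega), hP (1 + c) (by omega)]
      have h3 : i + (1 + c) = i + 1 + c := by omega
      rw [h3]
    · have hA' : pvGet2 (pvElimA mat i n) (i + 1 + j) (i + 1 + c)
          = (mat.getD (i + 1 + j) []).getD (i + 1 + c) 0 := by
        show ((pvElimA mat i n).getD (i + 1 + j) []).getD (i + 1 + c) 0 = _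
        have hne : ¬ (i + 1 ≤ i + 1 + j ∧ i + 1 + j < (i + 1) + (n - (i + 1))
            ∧ i + 1 + j < mat.length ∧ pvGet2 mat (i + 1 + j) i = 1) := by
          rintro ⟨_, _, _, hx⟩; exact hcc hx
        rw [hchar2 (i + 1 + j), if_neg hne]
      rw [if_neg (by rw [hcond]; simpa using hcc), hA']
      rw [pv_drop_getD, hEj (1 + c) (by omega)]
      have h3 : i + (1 + c) = i + 1 + c := by omega
      rw [h3]

theorem pv_loop_eq (n : Nat) :
    ∀ (d i : Nat) (mat rows : List (List Int)) (det : Int),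
      n - i = d → (det = 0 ∨ det = 1) → pvRel n i mat rows →
      pvLoopA n i mat det = pvGoB rows det := by
  intro d
  induction d with
  | zero =>
    intro i mat rows det hd _ hrel
    obtain ⟨_, hrl, _, _, _⟩ := hrel
    have hnil : rows = [] := List.length_eq_zero_iff.1 (by omega)
    subst hnil
    rw [pvLoopA, dif_neg (by omega), pvGoB]
  | succ d ih =>
    intro i mat rows det hd hdet hrel
    have hin : i < n := by omega
    obtain ⟨hml, hrl, hrowA, hrowB, hent⟩ := hrel
    obtain ⟨r0, rtl, hcons⟩ : ∃ r0 rtl, rows = r0 :: rtl := by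
      cases rows with
      | nil => simp at hrl; omega
      | cons a b => exact ⟨a, b, rfl⟩
    subst hcons
    rw [pvLoopA, dif_pos hin, pvGoB]
    have hfind : pvFindPivot mat i n
        = ((r0 :: rtl).findIdx? (fun r => r.getD 0 0 == 1)).map (fun k => i + k) := by
      unfold pvFindPivot
      rw [show n - i = (r0 :: rtl).length from by omega]
      refine pv_find_shift [] (r0 :: rtl) i _ _ ?_
      intro t ht
      have := hent t 0 (by omega) (by omega)
      rw [this]
      rw [show i + 0 = i from by omega]
    rw [hfind]
    cases hidx : (r0 :: rtl).findIdx? (fun r => r.getD 0 0 == 1) with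
    | none => rfl
    | some k =>
      simp only [Option.map_some]
      have hk : k < (r0 :: rtl).length :=
        (List.findIdx?_eq_some_iff_findIdx_eq.1 hidx).1
      have hkn : k < n - i := by rw [← hrl]; exact hk
      have hdet' : PySem.Int.mod (det + 1) 2 = Int.xor det 1 := by
        rcases hdet with h | h <;> subst h <;> decide
      have hdet2 : ∀ b : Int, b = 0 ∨ b = 1 → Int.xor b 1 = 0 ∨ Int.xor b 1 = 1 := by
        rintro b (h | h) <;> subst h <;> [right; left] <;> decide
      by_cases hk0 : k = 0
      · subst hk0
        simp only [show ¬ (i + 0 ≠ i) from by omega, show ¬ (0 ≠ 0) from by omega,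
          if_neg, not_false_iff]
        exact ih (i + 1) (pvElimA mat i n) (pvStepB (r0 :: rtl)) det (by omega) hdet
          (pv_step_rel n i hin mat (r0 :: rtl) ⟨hml, hrl, hrowA, hrowB, hent⟩)
      · rw [if_pos (show i + k ≠ i from by omega), if_pos hk0,
          if_pos (show i + k ≠ i from by omega), if_pos hk0, hdet']
        exact ih (i + 1) (pvElimA (pvSwapA mat i (i + k)) i n) (pvStepB (pvSwapB (r0 :: rtl) k))
          (Int.xor det 1) (by omega) (hdet2 det hdet)
          (pv_step_rel n i hin _ _
            (pv_swap_rel n i k hin hkn mat (r0 :: rtl) ⟨hml, hrl, hrowA, hrowB, hent⟩))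

-- ===== VERDICT (by name: the statement is the Claim_ definition above) =====
theorem matrix_determinant_mod2_spec : Claim_equal_matrix_determinant_mod2 := by
  intro matrix _ hpre
  obtain ⟨hne, himp⟩ := hpre
  unfold Spec_matrix_determinant_mod2 matrix_determinant_mod2 matrix_determinant_mod2_alt
  by_cases hp : ∃ row ∈ matrix, row.getD 0 0 = 1
  · have hlen := himp hp
    have hrow : ∀ j, j < matrix.length → matrix.length ≤ (matrix.getD j []).length := by
      intro j hj
      have hmem : matrix.getD j [] ∈ matrix := by
        rw [List.getD_eq_getElem?_getD, List.getElem?_eq_getElem hj]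
        exact List.getElem_mem _
      exact hlen _ hmem
    refine pv_loop_eq matrix.length matrix.length 0 matrix matrix 1 (by omega) (Or.inr rfl)
      ⟨rfl, by omega, hrow, by simpa using hrow, ?_⟩
    intro j c _ _
    simp [pvGet2]
  · -- no row starts with a 1: both sides stop at the very first pivot search
    cases matrix with
    | nil => rw [pvLoopA, dif_neg (by simp), pvGoB]
    | cons r0 rtl =>
      rw [pvLoopA, dif_pos (by simp)]
      have hfind : pvFindPivot (r0 :: rtl) 0 (r0 :: rtl).length = none := by
        unfold pvFindPivot
        rw [List.find?_eq_none]
        intro j hj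
        rw [List.mem_range'_1] at hj
        have hmem : (r0 :: rtl).getD j [] ∈ r0 :: rtl := by
          rw [List.getD_eq_getElem?_getD, List.getElem?_eq_getElem (by omega)]
          exact List.getElem_mem _
        intro hcon
        exact hp ⟨_, hmem, by simpa [pvGet2] using hcon⟩
      have hfi : (r0 :: rtl).findIdx? (fun r => r.getD 0 0 == 1) = none := by
        rw [List.findIdx?_eq_none_iff]
        intro x hx
        by_cases hx1 : x.getD 0 0 = 1
        · exact absurd ⟨x, hx, hx1⟩ hp
        · simpa using hx1
      rw [hfind, pvGoB, hfi]
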